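-- pv_equiv track=rewrite | github.com/stalyndc/tinyseoai-cli | tinyseoai/agents/link_analysis.py | _extract_link_insights
-- ===== SOURCE A (Python) =====
-- from typing import Any
--
-- def _extract_link_insights(issues: list[dict[str, Any]]) -> list[str]:
--     """Extract link analysis insights."""
--     insights = []
--
--     # Broken links
--     broken_links = [
--         i for i in issues if "broken" in i.get("type", "").lower() or "404" in i.get("type", "").lower()
--     ]
--     if broken_links:
--         insights.append(
--             f"Link Alert: {len(broken_links)} broken links found - fix these to improve user experience and SEO"
--         )
--
--     # Orphan pages
--     orphan_issues = [i for i in issues if "orphan" in i.get("type", "").lower()]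
--     if orphan_issues:
--         insights.append(
--             f"Architecture Issue: {len(orphan_issues)} orphan pages - these pages have no internal links and may not be crawled"
--         )
--
--     # Redirects
--     redirect_issues = [i for i in issues if "redirect" in i.get("type", "").lower()]
--     if redirect_issues:
--         insights.append(
--             f"Found {len(redirect_issues)} redirect issues - chains and loops slow down crawling"
--         )
--
--     return insights
-- ===== SOURCE B (Python) =====
-- def _extract_link_insights(issues):
--     """Extract link analysis insights (single-pass counter version)."""
--     broken = orphan = redirect = 0
--     for i in issues:
--         t = i.get("type", "").lower()
--         if "broken" in t or "404" in t:
--             broken += 1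
--         if "orphan" in t:
--             orphan += 1
--         if "redirect" in t:
--             redirect += 1
--     insights = []
--     if broken:
--         insights.append(
--             f"Link Alert: {broken} broken links found - fix these to improve user experience and SEO"
--         )
--     if orphan:
--         insights.append(
--             f"Architecture Issue: {orphan} orphan pages - these pages have no internal links and may not be crawled"
--         )
--     if redirect:
--         insights.append(
--             f"Found {redirect} redirect issues - chains and loops slow down crawling"
--         )
--     return insights
-- ===== Notes on version B (the rewrite author's own statement) =====
-- stated objective: alternative
-- what changed: Replaces three separate filtering list-comprehensions (each materialising a list, the first lowering the type string twice) with one pass over issues that lowers each type string once and maintains three independent integer counters.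
import Mathlib
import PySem

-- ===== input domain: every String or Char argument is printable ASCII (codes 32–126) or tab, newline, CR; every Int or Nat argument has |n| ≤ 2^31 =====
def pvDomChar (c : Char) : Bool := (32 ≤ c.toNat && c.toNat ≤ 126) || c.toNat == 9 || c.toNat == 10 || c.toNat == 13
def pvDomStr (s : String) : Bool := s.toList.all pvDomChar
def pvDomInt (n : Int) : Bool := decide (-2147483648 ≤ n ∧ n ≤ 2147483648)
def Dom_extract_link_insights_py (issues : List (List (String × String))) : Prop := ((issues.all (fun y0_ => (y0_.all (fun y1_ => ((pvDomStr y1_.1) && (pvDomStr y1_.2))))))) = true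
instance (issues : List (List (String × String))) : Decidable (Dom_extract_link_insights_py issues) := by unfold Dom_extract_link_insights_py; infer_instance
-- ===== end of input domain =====

-- B replaces A's three filtering list-comprehensions by one loop keeping three counters (one lowercase per item, no intermediate lists).

-- i.get("type", "") on the assoc-list dict: first matching key, default ""
def pvGetType (i : List (String × String)) : String := (List.lookup "type" i).getD ""

-- ===== PORT A =====
def extract_link_insights_py (issues : List (List (String × String))) : List String :=
  let insights : List String := []
  let broken_links := issues.filter (fun i =>
    PySem.Str.isIn "broken" (PySem.Str.lower (pvGetType i)) ||
    PySem.Str.isIn "404" (PySem.Str.lower (pvGetType i)))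
  let insights := if broken_links.isEmpty then insights else
    insights ++ ["Link Alert: " ++ PySem.Int.toStr (broken_links.length : Int) ++ " broken links found - fix these to improve user experience and SEO"]
  let orphan_issues := issues.filter (fun i =>
    PySem.Str.isIn "orphan" (PySem.Str.lower (pvGetType i)))
  let insights := if orphan_issues.isEmpty then insights else
    insights ++ ["Architecture Issue: " ++ PySem.Int.toStr (orphan_issues.length : Int) ++ " orphan pages - these pages have no internal links and may not be crawled"]
  let redirect_issues := issues.filter (fun i =>
    PySem.Str.isIn "redirect" (PySem.Str.lower (pvGetType i)))
  let insights := if redirect_issues.isEmpty then insights else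
    insights ++ ["Found " ++ PySem.Int.toStr (redirect_issues.length : Int) ++ " redirect issues - chains and loops slow down crawling"]
  insights

-- ===== PORT B =====
-- one pass: three independent counters, the type string lowered once per item
def extract_link_insights_py_alt (issues : List (List (String × String))) : List String :=
  let acc := issues.foldl (fun (acc : Int × Int × Int) i =>
    let t := PySem.Str.lower (pvGetType i)
    ((if PySem.Str.isIn "broken" t || PySem.Str.isIn "404" t then acc.1 + 1 else acc.1),
     (if PySem.Str.isIn "orphan" t then acc.2.1 + 1 else acc.2.1),
     (if PySem.Str.isIn "redirect" t then acc.2.2 + 1 else acc.2.2))) (0, 0, 0)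
  let insights : List String := []
  let insights := if acc.1 ≠ 0 then
    insights ++ ["Link Alert: " ++ PySem.Int.toStr acc.1 ++ " broken links found - fix these to improve user experience and SEO"] else insights
  let insights := if acc.2.1 ≠ 0 then
    insights ++ ["Architecture Issue: " ++ PySem.Int.toStr acc.2.1 ++ " orphan pages - these pages have no internal links and may not be crawled"] else insights
  let insights := if acc.2.2 ≠ 0 then
    insights ++ ["Found " ++ PySem.Int.toStr acc.2.2 ++ " redirect issues - chains and loops slow down crawling"] else insights
  insights

-- ===== PRECONDITION & SPEC =====
def Spec_extract_link_insights_py (issues : List (List (String × String))) (out : List String) : Prop := out = extract_link_insights_py_alt issues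
instance (issues : List (List (String × String))) (out : List String) : Decidable (Spec_extract_link_insights_py issues out) := by unfold Spec_extract_link_insights_py; infer_instance

-- ===== CLAIM (what is proved, stated in full; the proofs are below) =====
def Claim_equal_extract_link_insights_py : Prop := ∀ (issues : List (List (String × String))), Dom_extract_link_insights_py issues → Spec_extract_link_insights_py issues (extract_link_insights_py issues)

-- ===== LEMMAS AND PROOFS =====

def pvPb (i : List (String × String)) : Bool :=
  PySem.Str.isIn "broken" (PySem.Str.lower (pvGetType i)) ||
  PySem.Str.isIn "404" (PySem.Str.lower (pvGetType i))
def pvPo (i : List (String × String)) : Bool :=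
  PySem.Str.isIn "orphan" (PySem.Str.lower (pvGetType i))
def pvPr (i : List (String × String)) : Bool :=
  PySem.Str.isIn "redirect" (PySem.Str.lower (pvGetType i))

theorem pvFold_eq (issues : List (List (String × String))) :
    ∀ b o r : Int,
    issues.foldl (fun (acc : Int × Int × Int) i =>
      let t := PySem.Str.lower (pvGetType i)
      ((if PySem.Str.isIn "broken" t || PySem.Str.isIn "404" t then acc.1 + 1 else acc.1),
       (if PySem.Str.isIn "orphan" t then acc.2.1 + 1 else acc.2.1),
       (if PySem.Str.isIn "redirect" t then acc.2.2 + 1 else acc.2.2))) (b, o, r)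
    = (b + (issues.countP pvPb : Int), o + (issues.countP pvPo : Int), r + (issues.countP pvPr : Int)) := by
  induction issues with
  | nil => intro b o r; simp
  | cons i is ih =>
    intro b o r
    rw [List.foldl_cons]
    show List.foldl _ (_, _, _) is = _
    rw [ih, List.countP_cons, List.countP_cons, List.countP_cons]
    unfold pvPb pvPo pvPr
    split_ifs <;> refine Prod.ext ?_ (Prod.ext ?_ ?_) <;> simp <;> ring

theorem pvFilter_isEmpty (p : List (String × String) → Bool) (l : List (List (String × String))) :
    (l.filter p).isEmpty = decide (l.countP p = 0) := by
  rw [List.countP_eq_length_filter]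
  cases List.filter p l <;> simp

-- ===== VERDICT (by name: the statement is the Claim_ definition above) =====
theorem extract_link_insights_py_spec : Claim_equal_extract_link_insights_py := by
  intro issues _
  unfold Spec_extract_link_insights_py extract_link_insights_py extract_link_insights_py_alt
  rw [pvFold_eq]
  simp only [zero_add]
  have fb : (fun i : List (String × String) =>
      PySem.Str.isIn "broken" (PySem.Str.lower (pvGetType i)) ||
      PySem.Str.isIn "404" (PySem.Str.lower (pvGetType i))) = pvPb := rfl
  have fo : (fun i : List (String × String) =>
      PySem.Str.isIn "orphan" (PySem.Str.lower (pvGetType i))) = pvPo := rfl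
  have fr : (fun i : List (String × String) =>
      PySem.Str.isIn "redirect" (PySem.Str.lower (pvGetType i))) = pvPr := rfl
  simp only [fb, fo, fr]
  rw [pvFilter_isEmpty pvPb, pvFilter_isEmpty pvPo, pvFilter_isEmpty pvPr,
    (List.countP_eq_length_filter (p := pvPb) (l := issues)).symm, (List.countP_eq_length_filter (p := pvPo) (l := issues)).symm,
    (List.countP_eq_length_filter (p := pvPr) (l := issues)).symm]
  generalize issues.countP pvPb = nb
  generalize issues.countP pvPo = no
  generalize issues.countP pvPr = nr
  by_cases hb : nb = 0 <;> by_cases ho : no = 0 <;> by_cases hr : nr = 0 <;>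
    simp [hb, ho, hr]
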